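-- pv_equiv track=rewrite | github.com/conversionratepros/salesai | server.py | get_filter_options
-- ===== SOURCE A (Python) =====
-- def get_filter_options(records):
--     """Extract unique values for each filter"""
--     options = {
--         'lead_topics': set(),
--         'wrap_up_reasons': set(),
--         'months': set(),
--         'products': set(),
--         'agents': set(),
--         'lead_outcomes': set()
--     }
--
--     for record in records:
--         fields = record.get('fields', {})
--
--         # Lead Topic with capital T
--         lead_topic = fields.get('Lead Topic')
--         if lead_topic:
--             options['lead_topics'].add(lead_topic)
--
--         # Wrap up reason field
--         wrap_up = fields.get('Wrap up reason')
--         if wrap_up: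
--             options['wrap_up_reasons'].add(wrap_up)
--
--         # Using Last Modified for months since Date of call doesn't exist
--         last_modified = fields.get('Last Modified')
--         if last_modified:
--             month = last_modified[:7]
--             options['months'].add(month)
--
--         # Product field
--         product = fields.get('Product')
--         if product:
--             options['products'].add(product)
--
--         # Agent field - you'll need to add this to Airtable if it doesn't exist
--         agent = fields.get('Agent')
--         if agent:
--             options['agents'].add(agent)
--
--         # Lead outcome field
--         outcome = fields.get('Lead outcome')
--         if outcome:
--             options['lead_outcomes'].add(outcome)
--
--     # Convert sets to sorted lists
--     return {
--         'lead_topics': sorted(list(options['lead_topics'])),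
--         'wrap_up_reasons': sorted(list(options['wrap_up_reasons'])),
--         'months': sorted(list(options['months']), reverse=True),
--         'products': sorted(list(options['products'])),
--         'agents': sorted(list(options['agents'])),
--         'lead_outcomes': sorted(list(options['lead_outcomes']))
--     }
-- ===== SOURCE B (Python) =====
-- def _field_values(records, key):
--     vals = []
--     for r in records:
--         v = r.get('fields', {}).get(key)
--         if v:
--             vals.append(v)
--     return vals
--
--
-- def get_filter_options(records):
--     """Extract unique values for each filter"""
--     return {
--         'lead_topics': sorted(set(_field_values(records, 'Lead Topic'))),
--         'wrap_up_reasons': sorted(set(_field_values(records, 'Wrap up reason'))),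
--         'months': sorted({v[:7] for v in _field_values(records, 'Last Modified')}, reverse=True),
--         'products': sorted(set(_field_values(records, 'Product'))),
--         'agents': sorted(set(_field_values(records, 'Agent'))),
--         'lead_outcomes': sorted(set(_field_values(records, 'Lead outcome'))),
--     }
-- ===== Notes on version B (the rewrite author's own statement) =====
-- stated objective: simpler
-- what changed: Replaces A's single fused loop that threads a six-set mutable state with six independent per-field passes (a shared helper collects one field's truthy values per pass), assembling the result dict directly from sorted sets.
import Mathlib
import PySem

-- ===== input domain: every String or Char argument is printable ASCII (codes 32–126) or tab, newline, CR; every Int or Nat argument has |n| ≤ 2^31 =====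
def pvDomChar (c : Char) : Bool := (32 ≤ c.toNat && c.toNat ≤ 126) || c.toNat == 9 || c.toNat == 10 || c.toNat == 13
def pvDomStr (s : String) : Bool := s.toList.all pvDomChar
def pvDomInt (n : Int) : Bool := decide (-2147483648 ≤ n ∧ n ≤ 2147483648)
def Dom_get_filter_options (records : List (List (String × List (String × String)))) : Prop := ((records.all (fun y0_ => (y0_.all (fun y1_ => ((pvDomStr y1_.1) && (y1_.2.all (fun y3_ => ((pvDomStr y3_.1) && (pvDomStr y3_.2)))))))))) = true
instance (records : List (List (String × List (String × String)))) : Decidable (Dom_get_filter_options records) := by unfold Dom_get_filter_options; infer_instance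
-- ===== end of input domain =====

-- B replaces A's single fused loop over a six-set state with six independent per-field passes; objective: simpler.


-- ===== PORT A =====
-- record.get('fields', {}) as a dict
def pvFields (record : List (String × List (String × String))) : PySem.Dict String String :=
  PySem.Dict.mk (PySem.Dict.getD (PySem.Dict.mk record) "fields" [])

-- 'v = fields.get(key); if v: s.add(g(v))' — one of A's six identical if-blocks
def pvAdd1 (s : PySem.Set String) (o : Option String) (g : String → String) : PySem.Set String :=
  match o with
  | some v => if v = "" then s else PySem.Set.add s (g v)
  | none => s

structure PVOpts where
  lead_topics : PySem.Set String
  wrap_up_reasons : PySem.Set String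
  months : PySem.Set String
  products : PySem.Set String
  agents : PySem.Set String
  lead_outcomes : PySem.Set String
deriving Repr, DecidableEq

-- one iteration of A's for-loop body: six conditional adds into the six sets
def pvStepA (opts : PVOpts) (record : List (String × List (String × String))) : PVOpts :=
  let fields := pvFields record
  let opts := { opts with lead_topics := pvAdd1 opts.lead_topics (PySem.Dict.get? fields "Lead Topic") (fun v => v) }
  let opts := { opts with wrap_up_reasons := pvAdd1 opts.wrap_up_reasons (PySem.Dict.get? fields "Wrap up reason") (fun v => v) }
  let opts := { opts with months := pvAdd1 opts.months (PySem.Dict.get? fields "Last Modified") (fun v => PySem.Str.slice v none (some 7)) }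
  let opts := { opts with products := pvAdd1 opts.products (PySem.Dict.get? fields "Product") (fun v => v) }
  let opts := { opts with agents := pvAdd1 opts.agents (PySem.Dict.get? fields "Agent") (fun v => v) }
  let opts := { opts with lead_outcomes := pvAdd1 opts.lead_outcomes (PySem.Dict.get? fields "Lead outcome") (fun v => v) }
  opts

def get_filter_options (records : List (List (String × List (String × String)))) : List (String × List String) :=
  let options : PVOpts := ⟨[], [], [], [], [], []⟩
  let options := records.foldl pvStepA options
  [("lead_topics", PySem.List.sorted options.lead_topics (fun x => x) false),
   ("wrap_up_reasons", PySem.List.sorted options.wrap_up_reasons (fun x => x) false),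
   ("months", PySem.List.sorted options.months (fun x => x) true),
   ("products", PySem.List.sorted options.products (fun x => x) false),
   ("agents", PySem.List.sorted options.agents (fun x => x) false),
   ("lead_outcomes", PySem.List.sorted options.lead_outcomes (fun x => x) false)]

-- ===== PORT B =====
-- one per-field pass: the truthy values of `key` across all records, in order
def pvFieldValues (records : List (List (String × List (String × String)))) (key : String) : List String :=
  records.foldl (fun vals r =>
    match PySem.Dict.get? (pvFields r) key with
    | some v => if v = "" then vals else vals ++ [v]
    | none => vals) []

def get_filter_options_alt (records : List (List (String × List (String × String)))) : List (String × List String) :=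
  [("lead_topics", PySem.List.sorted (PySem.Set.ofList (pvFieldValues records "Lead Topic")) (fun x => x) false),
   ("wrap_up_reasons", PySem.List.sorted (PySem.Set.ofList (pvFieldValues records "Wrap up reason")) (fun x => x) false),
   ("months", PySem.List.sorted (PySem.Set.ofList ((pvFieldValues records "Last Modified").map (fun v => PySem.Str.slice v none (some 7)))) (fun x => x) true),
   ("products", PySem.List.sorted (PySem.Set.ofList (pvFieldValues records "Product")) (fun x => x) false),
   ("agents", PySem.List.sorted (PySem.Set.ofList (pvFieldValues records "Agent")) (fun x => x) false),
   ("lead_outcomes", PySem.List.sorted (PySem.Set.ofList (pvFieldValues records "Lead outcome")) (fun x => x) false)]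

-- ===== PRECONDITION & SPEC =====
def Spec_get_filter_options (records : List (List (String × List (String × String)))) (out : List (String × List String)) : Prop := out = get_filter_options_alt records
instance (records : List (List (String × List (String × String)))) (out : List (String × List String)) : Decidable (Spec_get_filter_options records out) := by unfold Spec_get_filter_options; infer_instance

-- ===== CLAIM (what is proved, stated in full; the proofs are below) =====
def Claim_equal_get_filter_options : Prop := ∀ (records : List (List (String × List (String × String)))), Dom_get_filter_options records → Spec_get_filter_options records (get_filter_options records)

-- ===== LEMMAS AND PROOFS =====

-- present-and-truthy test / value of one field of one record
def pvHas (key : String) (r : List (String × List (String × String))) : Bool :=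
  decide (((PySem.Dict.get? (pvFields r) key).getD "") ≠ "")
def pvVal (key : String) (r : List (String × List (String × String))) : String :=
  (PySem.Dict.get? (pvFields r) key).getD ""

theorem pvFieldValues_eq (rs : List (List (String × List (String × String)))) (key : String) :
    pvFieldValues rs key = (rs.filter (pvHas key)).map (pvVal key) := by
  have hbody : (fun (vals : List String) r =>
      match PySem.Dict.get? (pvFields r) key with
      | some v => if v = "" then vals else vals ++ [v]
      | none => vals)
      = fun vals r => if pvHas key r = true then vals ++ [pvVal key r] else vals := by
    funext vals r
    unfold pvHas pvVal
    cases h : PySem.Dict.get? (pvFields r) key with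
    | none => simp
    | some v =>
      by_cases hv : v = "" <;> simp [hv]
  unfold pvFieldValues
  rw [hbody, PySem.List.foldl_append_if]
  simp

-- a projection of A's fused fold equals the per-field fold of pvAdd1
theorem pv_proj_foldl (key : String) (g : String → String)
    (proj : PVOpts → PySem.Set String)
    (hproj : ∀ (opts : PVOpts) (r : List (String × List (String × String))),
      proj (pvStepA opts r) = pvAdd1 (proj opts) (PySem.Dict.get? (pvFields r) key) g) :
    ∀ (rs : List (List (String × List (String × String)))) (opts : PVOpts),
      proj (rs.foldl pvStepA opts)
        = rs.foldl (fun s r => pvAdd1 s (PySem.Dict.get? (pvFields r) key) g) (proj opts) := by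
  intro rs
  induction rs with
  | nil => intro opts; rfl
  | cons r rs ih =>
    intro opts
    simp only [List.foldl_cons]
    rw [ih, hproj]

-- and that per-field fold is B's "sort a set of the collected truthy values" ingredient
theorem pv_field_fold (key : String) (g : String → String)
    (rs : List (List (String × List (String × String)))) (s0 : PySem.Set String) :
    rs.foldl (fun s r => pvAdd1 s (PySem.Dict.get? (pvFields r) key) g) s0
      = ((pvFieldValues rs key).map g).foldl PySem.Set.add s0 := by
  rw [pvFieldValues_eq]
  induction rs generalizing s0 with
  | nil => rfl
  | cons r rs ih =>
    simp only [List.foldl_cons]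
    by_cases hr : pvHas key r = true
    · have hv : PySem.Dict.get? (pvFields r) key = some (pvVal key r) ∧ pvVal key r ≠ "" := by
        unfold pvHas pvVal at *
        cases h : PySem.Dict.get? (pvFields r) key with
        | none => simp [h] at hr
        | some v => simp [h] at hr ⊢; exact hr
      rw [List.filter_cons_of_pos hr]
      simp only [List.map_cons, List.foldl_cons]
      rw [ih]
      congr 1
      simp [pvAdd1, hv.1, hv.2]
    · have : pvAdd1 s0 (PySem.Dict.get? (pvFields r) key) g = s0 := by
        unfold pvHas at hr
        cases h : PySem.Dict.get? (pvFields r) key with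
        | none => simp [pvAdd1]
        | some v => simp [h] at hr; simp [pvAdd1, hr]
      rw [List.filter_cons_of_neg (by simpa using hr), this, ih]

theorem pv_component (key : String) (g : String → String)
    (proj : PVOpts → PySem.Set String)
    (hproj : ∀ (opts : PVOpts) (r : List (String × List (String × String))),
      proj (pvStepA opts r) = pvAdd1 (proj opts) (PySem.Dict.get? (pvFields r) key) g)
    (hnil : proj ⟨[], [], [], [], [], []⟩ = [])
    (rs : List (List (String × List (String × String)))) :
    proj (rs.foldl pvStepA ⟨[], [], [], [], [], []⟩)
      = PySem.Set.ofList ((pvFieldValues rs key).map g) := by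
  rw [pv_proj_foldl key g proj hproj, PySem.Set.ofList_eq_foldl, pv_field_fold, hnil]

theorem get_filter_options_spec : Claim_equal_get_filter_options := by
  unfold Claim_equal_get_filter_options
  intro records _
  unfold Spec_get_filter_options get_filter_options get_filter_options_alt
  have h1 := pv_component "Lead Topic" (fun v => v) (fun o => o.lead_topics) (fun _ _ => rfl) rfl records
  have h2 := pv_component "Wrap up reason" (fun v => v) (fun o => o.wrap_up_reasons) (fun _ _ => rfl) rfl records
  have h3 := pv_component "Last Modified" (fun v => PySem.Str.slice v none (some 7)) (fun o => o.months) (fun _ _ => rfl) rfl records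
  have h4 := pv_component "Product" (fun v => v) (fun o => o.products) (fun _ _ => rfl) rfl records
  have h5 := pv_component "Agent" (fun v => v) (fun o => o.agents) (fun _ _ => rfl) rfl records
  have h6 := pv_component "Lead outcome" (fun v => v) (fun o => o.lead_outcomes) (fun _ _ => rfl) rfl records
  simp only [] at h1 h2 h3 h4 h5 h6
  simp only [h1, h2, h3, h4, h5, h6, List.map_id']
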